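-- pv_equiv track=rewrite | github.com/dillonvuong/Columns-Game | columns.py | fall_down
-- ===== SOURCE A (Python) =====
-- NONE = [0,0]
--
-- def fall_down(board:[[str]]) -> [[str]]:
--     'Moves all floating gems down to the lowest unfilled row'
--     boundary = len(board[0]) - 1
--     for column in board:
--         for index in range(len(column)-2, -1, -1):
--             if index != len(column)-1 and column[index] != NONE and column[index+1] == NONE:
--                 counter = index
--                 while counter != boundary and column[counter+1] == NONE:
--                     counter += 1
--                 column[counter] = column[index]
--                 column[index] = NONE
--     return board
-- ===== SOURCE B (Python) =====
-- NONE = [0,0]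
--
-- def fall_down(board):
--     'Moves all floating gems down to the lowest unfilled row'
--     for column in board:
--         gems = [cell for cell in column if cell != NONE]
--         column[:] = [NONE] * (len(column) - len(gems)) + gems
--     return board
-- ===== Notes on version B (the rewrite author's own statement) =====
-- stated objective: simpler
-- what changed: Per-gem downward bubbling with an inner while-scan is replaced by a single filter-and-pad pass that rebuilds each column as NONE padding followed by its gems in order.
import Mathlib
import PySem

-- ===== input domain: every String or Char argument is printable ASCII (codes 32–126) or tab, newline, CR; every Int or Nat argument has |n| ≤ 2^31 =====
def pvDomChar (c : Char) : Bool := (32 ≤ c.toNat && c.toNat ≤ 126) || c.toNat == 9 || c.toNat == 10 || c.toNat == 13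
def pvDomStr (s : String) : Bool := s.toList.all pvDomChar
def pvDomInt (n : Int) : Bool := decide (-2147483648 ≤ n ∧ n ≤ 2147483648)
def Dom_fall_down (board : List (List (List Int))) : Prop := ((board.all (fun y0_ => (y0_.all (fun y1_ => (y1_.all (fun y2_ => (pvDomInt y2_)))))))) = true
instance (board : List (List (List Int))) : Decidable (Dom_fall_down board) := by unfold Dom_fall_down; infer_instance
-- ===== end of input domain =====

-- B replaces A's per-gem bubbling (inner while-scan per gem) by one filter-and-pad pass
-- per column (objective: simpler). A mutates board and its columns in place and returns it;
-- B performs the analogous in-place update; the equivalence proved here is about the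
-- return value.

-- ===== PORT A =====
def pvNone : List Int := [0, 0]

-- the 'while counter != boundary and column[counter+1] == NONE: counter += 1' loop;
-- fuel = len(column) suffices since counter starts at a list index ≥ 0 and the second
-- conjunct forces counter+1 to stay an in-range index
def whileA (col : List (List Int)) (boundary : Int) : Int → Nat → Int
  | counter, 0 => counter
  | counter, Nat.succ fuel =>
    if counter ≠ boundary ∧ PySem.List.pyGet? col (counter + 1) = some pvNone
    then whileA col boundary (counter + 1) fuel
    else counter

-- one iteration of A's inner 'for index in range(len(column)-2, -1, -1)' body
def stepA (boundary : Int) (col : List (List Int)) (index : Int) : List (List Int) :=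
  match PySem.List.pyGet? col index, PySem.List.pyGet? col (index + 1) with
  | some a, some b =>
    if index ≠ (col.length : Int) - 1 ∧ a ≠ pvNone ∧ b = pvNone then
      let counter := whileA col boundary index col.length
      PySem.List.pySetD (PySem.List.pySetD col counter a) index pvNone
    else col
  | _, _ => col

def fallColA (boundary : Int) (col : List (List Int)) : List (List Int) :=
  (PySem.List.pyRange ((col.length : Int) - 2) (-1) (-1)).foldl (stepA boundary) col

def fall_down (board : List (List (List Int))) : List (List (List Int)) :=
  match board.head? with
  | none => board   -- unreachable under Pre_: Python raises IndexError on board[0]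
  | some c0 => board.map (fallColA ((c0.length : Int) - 1))

-- ===== PORT B =====
def fall_down_alt (board : List (List (List Int))) : List (List (List Int)) :=
  board.map (fun col =>
    let gems := col.filter (fun cell => decide (cell ≠ pvNone))
    List.replicate (col.length - gems.length) pvNone ++ gems)

-- ===== PRECONDITION & SPEC =====
-- Pre_ excludes the empty board (A raises IndexError on board[0]) and boards with an
-- off-length column holding a floating gem (a non-NONE cell directly above a NONE cell):
-- there A's use of the FIRST column's length as the floor ('boundary = len(board[0]) - 1')
-- makes it raise IndexError or strand/delete gems at an accidental row, an artefact of its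
-- implementation; the game's natural domain is a rectangular board, and columns of other
-- lengths are admitted whenever they are already settled (nothing to move).
def Pre_fall_down (board : List (List (List Int))) : Prop :=
  board ≠ [] ∧ ∀ col ∈ board, col.length = (board.headD []).length ∨
    List.IsChain (fun a b => a ≠ pvNone → b ≠ pvNone) col
instance (board : List (List (List Int))) : Decidable (Pre_fall_down board) := by
  unfold Pre_fall_down; infer_instance

def pvWitness_fall_down : List (List (List Int)) :=
  [[[1, 2], [0, 0]], [[0, 0], [3, 4]]]

def Spec_fall_down (board : List (List (List Int))) (out : List (List (List Int))) : Prop := out = fall_down_alt board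
instance (board : List (List (List Int))) (out : List (List (List Int))) : Decidable (Spec_fall_down board out) := by unfold Spec_fall_down; infer_instance

-- ===== CLAIM (what is proved, stated in full; the proofs are below) =====
def Claim_equal_fall_down : Prop := ∀ (board : List (List (List Int))), Dom_fall_down board → Pre_fall_down board → Spec_fall_down board (fall_down board)

-- ===== LEMMAS AND PROOFS =====

-- 'compact col' is what B produces for one column
def compact (xs : List (List Int)) : List (List Int) :=
  let gems := xs.filter (fun cell => decide (cell ≠ pvNone))
  List.replicate (xs.length - gems.length) pvNone ++ gems

theorem whileA_spec (col : List (List Int)) (boundary counter : Int) (k fuel : Nat)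
    (hfuel : k ≤ fuel)
    (hrun : ∀ j : Nat, j < k → PySem.List.pyGet? col (counter + j + 1) = some pvNone)
    (hstop : counter + k = boundary ∨ PySem.List.pyGet? col (counter + k + 1) ≠ some pvNone)
    (hnb : ∀ j : Nat, j < k → counter + j ≠ boundary) :
    whileA col boundary counter fuel = counter + k := by
  induction k generalizing counter fuel with
  | zero =>
    cases fuel with
    | zero => simp [whileA]
    | succ f =>
      simp only [whileA]
      rw [if_neg]
      · omega
      · rcases hstop with h | h
        · intro ⟨h1, _⟩; exact h1 (by omega)
        · intro ⟨_, h2⟩; exact h (by simpa using h2)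
  | succ k ih =>
    cases fuel with
    | zero => omega
    | succ f =>
      simp only [whileA]
      rw [if_pos ⟨by simpa using hnb 0 (by omega), by simpa using hrun 0 (by omega)⟩]
      rw [ih (counter + 1) f (by omega)
        (fun j hj => by
          have h := hrun (j + 1) (by omega)
          push_cast at h
          have e : counter + ((j : Int) + 1) + 1 = counter + 1 + j + 1 := by ring
          rwa [e] at h)
        (by
          rcases hstop with h | h
          · left; omega
          · right; intro hc
            apply h
            have e : counter + ((k : Int) + 1) + 1 = counter + 1 + k + 1 := by push_cast; ring
            push_cast
            rwa [e]
          )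
        (fun j hj => by
          have h := hnb (j + 1) (by omega)
          push_cast at h; omega)]
      push_cast; ring

-- ---- small list facts used by the step lemma ----

theorem set_append_right' {α : Type} (pre t : List α) (n : Nat) (v : α) :
    (pre ++ t).set (pre.length + n) v = pre ++ t.set n v := by
  induction pre with
  | nil => simp
  | cons x xs ih => simp [Nat.succ_add, ih]

theorem replicate_set_last {α : Type} (k : Nat) (hk : 1 ≤ k) (a v : α) :
    (List.replicate k a).set (k - 1) v = List.replicate (k - 1) a ++ [v] := by
  induction k with
  | zero => omega
  | succ k ih =>
    cases k with
    | zero => simp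
    | succ k => simpa [List.replicate_succ] using ih (by omega)

theorem compact_congr (xs ys : List (List Int)) (hl : xs.length = ys.length)
    (hf : xs.filter (fun c => decide (c ≠ pvNone)) = ys.filter (fun c => decide (c ≠ pvNone))) :
    compact xs = compact ys := by
  simp only [compact]
  rw [hf, hl]

theorem filter_replicate_append (j : Nat) (gems : List (List Int))
    (h : ∀ x ∈ gems, x ≠ pvNone) :
    (List.replicate j pvNone ++ gems).filter (fun c => decide (c ≠ pvNone)) = gems := by
  rw [List.filter_append, List.filter_replicate,
    List.filter_eq_self.mpr (fun x hx => by simp [h x hx])]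
  simp

theorem length_compact (xs : List (List Int)) : (compact xs).length = xs.length := by
  simp only [compact, List.length_append, List.length_replicate]
  have := List.length_filter_le (fun c => decide (c ≠ pvNone)) xs
  omega

theorem compact_short (xs : List (List Int)) (h : xs.length ≤ 1) : compact xs = xs := by
  match xs with
  | [] => rfl
  | [x] =>
    by_cases hx : x = pvNone
    · subst hx; simp [compact]
    · simp [compact, hx]
  | x :: y :: t => simp at h

theorem compact_compact (xs : List (List Int)) : compact (compact xs) = compact xs := by
  apply compact_congr
  · exact length_compact xs
  · simp only [compact]
    rw [filter_replicate_append]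
    intro x hx
    simpa using (List.of_mem_filter hx)

-- ---- the step lemma: one body of A's for-loop on a column whose below-suffix is compacted ----

theorem filter_compact (xs : List (List Int)) :
    (compact xs).filter (fun c => decide (c ≠ pvNone)) = xs.filter (fun c => decide (c ≠ pvNone)) := by
  simp only [compact]
  exact filter_replicate_append _ _ (fun x hx => by simpa using List.of_mem_filter hx)

theorem cons_none_replicate (k : Nat) (gems : List (List Int)) :
    pvNone :: (List.replicate k pvNone ++ gems) = List.replicate k pvNone ++ pvNone :: gems := by
  induction k with
  | zero => rfl
  | succ k ih => simpa [List.replicate_succ] using ih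

theorem compact_cons_eval (g : List Int) (k : Nat) (gems : List (List Int))
    (h : ∀ x ∈ gems, x ≠ pvNone) :
    compact (g :: (List.replicate k pvNone ++ gems))
      = if g = pvNone then List.replicate (k + 1) pvNone ++ gems
        else List.replicate k pvNone ++ g :: gems := by
  have hf := filter_replicate_append k gems h
  by_cases hg : g = pvNone
  · rw [if_pos hg]
    subst hg
    simp only [compact, List.filter_cons]
    simp only [ne_eq, not_true_eq_false, decide_false, Bool.false_eq_true, if_false, hf]
    congr 1
    congr 1
    simp only [List.length_cons, List.length_append, List.length_replicate]
    omega
  · rw [if_neg hg]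
    simp only [compact, List.filter_cons]
    simp only [ne_eq, hg, not_false_eq_true, decide_true, if_true, hf]
    congr 1
    congr 1
    simp only [List.length_cons, List.length_append, List.length_replicate]
    omega

theorem stepA_spec' (pre : List (List Int)) (g : List Int) (k : Nat) (gems : List (List Int))
    (hgems : ∀ x ∈ gems, x ≠ pvNone) :
    stepA (((pre ++ g :: (List.replicate k pvNone ++ gems)).length : Int) - 1)
        (pre ++ g :: (List.replicate k pvNone ++ gems)) (pre.length)
      = pre ++ compact (g :: (List.replicate k pvNone ++ gems)) := by
  have hget0 : PySem.List.pyGet? (pre ++ g :: (List.replicate k pvNone ++ gems)) (pre.length : Int)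
      = some g := PySem.List.pyGet?_append_length pre _ g
  have hget : ∀ j : Nat,
      PySem.List.pyGet? (pre ++ g :: (List.replicate k pvNone ++ gems)) ((pre.length : Int) + (j : Int) + 1)
        = (g :: (List.replicate k pvNone ++ gems))[j + 1]? := by
    intro j
    have e : ((pre.length : Int) + (j : Int) + 1) = (pre.length : Int) + ((j + 1 : Nat) : Int) := by
      push_cast; ring
    rw [e, PySem.List.pyGet?_append_right]
  have hget1 : PySem.List.pyGet? (pre ++ g :: (List.replicate k pvNone ++ gems)) ((pre.length : Int) + 1)
      = (List.replicate k pvNone ++ gems)[0]? := by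
    have := hget 0
    simpa using this
  rw [compact_cons_eval g k gems hgems]
  unfold stepA
  rw [hget0, hget1]
  cases k with
  | zero =>
    cases gems with
    | nil =>
      by_cases hg : g = pvNone <;> simp [hg]
    | cons r rs =>
      have hr : r ≠ pvNone := hgems r (by simp)
      rw [show (List.replicate 0 pvNone ++ r :: rs)[0]? = some r from rfl]
      dsimp only
      rw [if_neg (by rintro ⟨-, -, h⟩; exact hr h)]
      by_cases hg : g = pvNone <;> simp [hg]
  | succ k' =>
    rw [show (List.replicate (k' + 1) pvNone ++ gems)[0]? = some pvNone from by
      rw [List.replicate_succ]; rfl]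
    dsimp only
    by_cases hg : g = pvNone
    · rw [if_neg (by rintro ⟨-, h, -⟩; exact h hg)]
      subst hg
      rw [if_pos rfl]
      simp [List.replicate_succ]
    · rw [if_pos ⟨by
          simp only [List.length_append, List.length_cons, List.length_replicate]
          push_cast; omega,
        hg, rfl⟩]
      rw [if_neg hg]
      have hwhile : whileA (pre ++ g :: (List.replicate (k' + 1) pvNone ++ gems))
          (((pre ++ g :: (List.replicate (k' + 1) pvNone ++ gems)).length : Int) - 1)
          (pre.length) (pre ++ g :: (List.replicate (k' + 1) pvNone ++ gems)).length
          = (pre.length : Int) + ((k' + 1 : Nat) : Int) := by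
        apply whileA_spec
        · simp only [List.length_append, List.length_cons, List.length_replicate]
          omega
        · intro j hj
          rw [hget j]
          simp only [List.getElem?_cons_succ]
          rw [List.getElem?_append_left (by simpa using hj)]
          simp [hj]
        · right
          rw [hget (k' + 1)]
          simp only [List.getElem?_cons_succ]
          rw [List.getElem?_append_right (by simp)]
          cases gems with
          | nil => simp
          | cons g0 gs =>
            have hg0 : g0 ≠ pvNone := hgems g0 (by simp)
            simp [List.length_replicate, hg0]
        · intro j hj
          simp only [List.length_append, List.length_cons, List.length_replicate]
          push_cast; omega
      rw [hwhile]
      have ecast : ((pre.length : Int) + ((k' + 1 : Nat) : Int)) = (((pre.length + (k' + 1) : Nat)) : Int) := by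
        push_cast; ring
      rw [ecast, PySem.List.pySetD_natCast, PySem.List.pySetD_natCast]
      rw [set_append_right' pre _ (k' + 1) g]
      rw [show (g :: (List.replicate (k' + 1) pvNone ++ gems)).set (k' + 1) g
            = g :: (List.replicate (k' + 1) pvNone ++ gems).set k' g from rfl]
      rw [show (List.replicate (k' + 1) pvNone ++ gems).set k' g
            = (List.replicate (k' + 1) pvNone).set k' g ++ gems from by
          rw [List.set_append, if_pos (by simp)]]
      rw [show (List.replicate (k' + 1) pvNone).set k' g = List.replicate k' pvNone ++ [g] from by
          simpa using replicate_set_last (k' + 1) (by omega) pvNone g]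
      have houter := set_append_right' pre (g :: ((List.replicate k' pvNone ++ [g]) ++ gems)) 0 pvNone
      rw [Nat.add_zero] at houter
      rw [houter]
      simp [List.replicate_succ, cons_none_replicate]

theorem fold_inv (L : Nat) (m : Nat) : ∀ (col : List (List Int)), col.length = L → m ≤ L →
    List.drop m col = compact (List.drop m col) →
    (PySem.List.pyRange ((m : Int) - 1) (-1) (-1)).foldl (stepA ((L : Int) - 1)) col
      = compact col := by
  induction m with
  | zero =>
    intro col hL hm hdrop
    rw [PySem.List.pyRange_neg_one_eq_nil (by norm_num)]
    simpa using hdrop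
  | succ m ih =>
    intro col hL hm hdrop
    have hdc : (List.drop m col).length = L - m := by simp [hL]
    obtain ⟨g, rest, hd⟩ : ∃ g rest, List.drop m col = g :: rest := by
      cases hdm : List.drop m col with
      | nil => rw [hdm] at hdc; simp at hdc; omega
      | cons a t => exact ⟨a, t, rfl⟩
    have hrest : List.drop (m + 1) col = rest := by
      have h1 : List.drop 1 (List.drop m col) = List.drop (m + 1) col := List.drop_drop
      rw [← h1, hd]
      rfl
    rw [hrest] at hdrop
    have hrest' : rest
        = List.replicate (rest.length - (rest.filter (fun c => decide (c ≠ pvNone))).length) pvNone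
            ++ rest.filter (fun c => decide (c ≠ pvNone)) := hdrop
    have hgems : ∀ x ∈ rest.filter (fun c => decide (c ≠ pvNone)), x ≠ pvNone :=
      fun x hx => by simpa using List.of_mem_filter hx
    have hcoldecomp : col = List.take m col ++ g :: rest := by
      conv_lhs => rw [← List.take_append_drop m col, hd]
    have htm : (List.take m col).length = m := by
      rw [List.length_take]; omega
    have e : ((m + 1 : Nat) : Int) - 1 = (m : Int) := by push_cast; ring
    rw [e, PySem.List.pyRange_neg_one_cons (by omega : (-1 : Int) < (m : Int)), List.foldl_cons]
    have hstep : stepA ((L : Int) - 1) col (m : Int) = List.take m col ++ compact (g :: rest) := by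
      have h := stepA_spec' (List.take m col) g
        (rest.length - (rest.filter (fun c => decide (c ≠ pvNone))).length)
        (rest.filter (fun c => decide (c ≠ pvNone))) hgems
      rw [← hrest'] at h
      rw [← hcoldecomp] at h
      rw [hL, htm] at h
      exact h
    rw [hstep]
    have hlenc : (g :: rest).length = L - m := by
      have hc2 := congrArg List.length hcoldecomp
      simp only [List.length_append, List.length_cons, htm] at hc2
      simp only [List.length_cons]
      omega
    have hlen' : (List.take m col ++ compact (g :: rest)).length = L := by
      have hc := congrArg List.length hcoldecomp
      simp only [List.length_append, List.length_cons, htm] at hc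
      simp only [List.length_append, length_compact, List.length_cons, htm]
      omega
    have hdrop' : List.drop m (List.take m col ++ compact (g :: rest)) = compact (g :: rest) := by
      have hdl := List.drop_left (l₁ := List.take m col) (l₂ := compact (g :: rest))
      rw [htm] at hdl
      exact hdl
    rw [ih (List.take m col ++ compact (g :: rest)) hlen' (by omega)
      (by rw [hdrop']; exact (compact_compact _).symm)]
    apply compact_congr
    · rw [hlen', hL]
    · conv_rhs => rw [hcoldecomp]
      rw [List.filter_append, List.filter_append, filter_compact]

theorem fallColA_eq_compact (L : Nat) (col : List (List Int)) (h : col.length = L) :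
    fallColA ((L : Int) - 1) col = compact col := by
  unfold fallColA
  subst h
  cases hL : col.length with
  | zero =>
    have : col = [] := List.eq_nil_of_length_eq_zero hL
    subst this
    simp [PySem.List.pyRange_neg_one_eq_nil (by norm_num : (-2 : Int) ≤ -1), compact]
  | succ n =>
    have e : (((n + 1 : Nat) : Int) - 2) = ((n : Int)) - 1 := by push_cast; ring
    rw [e]
    exact fold_inv (n + 1) n col hL (by omega)
      (compact_short (List.drop n col) (by simp [hL]) ).symm

theorem stepA_settled (b : Int) (col : List (List Int))
    (hs : List.IsChain (fun a b => a ≠ pvNone → b ≠ pvNone) col) (i : Int) (hi : 0 ≤ i) :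
    stepA b col i = col := by
  unfold stepA
  split
  · rename_i a b' h1 h2
    rw [if_neg]
    rintro ⟨-, ha, hb⟩
    rw [PySem.List.pyGet?_of_nonneg _ hi] at h1
    rw [PySem.List.pyGet?_of_nonneg _ (by omega : (0:Int) ≤ i + 1)] at h2
    have hi1 : (i + 1).toNat = i.toNat + 1 := by omega
    rw [hi1] at h2
    have hlt : i.toNat + 1 < col.length := by
      by_contra hge
      rw [List.getElem?_eq_none (by omega)] at h2
      simp at h2
    have ha' : col[i.toNat] = a := by
      have h := List.getElem?_eq_getElem (l := col) (show i.toNat < col.length by omega)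
      rw [h] at h1; exact (Option.some.injEq _ _).mp h1
    have hb' : col[i.toNat + 1] = b' := by
      have h := List.getElem?_eq_getElem (l := col) hlt
      rw [h] at h2; exact (Option.some.injEq _ _).mp h2
    have := (List.isChain_iff_getElem.mp hs) i.toNat hlt
    rw [ha', hb'] at this
    exact this ha hb
  · rfl

theorem foldl_stepA_settled (b : Int) (col : List (List Int))
    (hs : List.IsChain (fun a b => a ≠ pvNone → b ≠ pvNone) col) :
    ∀ l : List Int, (∀ x ∈ l, 0 ≤ x) → l.foldl (stepA b) col = col := by
  intro l hl
  induction l with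
  | nil => rfl
  | cons x xs ih =>
    rw [List.foldl_cons, stepA_settled b col hs x (hl x (by simp))]
    exact ih (fun y hy => hl y (by simp [hy]))

theorem all_ne_of_settled (x : List Int) (xs : List (List Int))
    (hs : List.IsChain (fun a b => a ≠ pvNone → b ≠ pvNone) (x :: xs)) (hx : x ≠ pvNone) :
    ∀ y ∈ x :: xs, y ≠ pvNone := by
  induction xs generalizing x with
  | nil => intro y hy; simp at hy; simpa [hy]
  | cons z zs ih =>
    intro y hy
    have hz : z ≠ pvNone := (List.isChain_cons_cons.mp hs).1 hx
    rcases List.mem_cons.mp hy with h | h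
    · simpa [h]
    · exact ih z (List.isChain_cons_cons.mp hs).2 hz y h

theorem compact_settled (col : List (List Int))
    (hs : List.IsChain (fun a b => a ≠ pvNone → b ≠ pvNone) col) : compact col = col := by
  induction col with
  | nil => rfl
  | cons x xs ih =>
    by_cases hx : x = pvNone
    · subst hx
      have hxs := ih (List.IsChain.tail hs)
      simp only [compact, List.filter_cons] at hxs ⊢
      simp only [ne_eq, not_true_eq_false, decide_false, Bool.false_eq_true, if_false]
      have hle := List.length_filter_le (fun c => decide (c ≠ pvNone)) xs
      rw [show (pvNone :: xs).length - (xs.filter (fun c => decide (c ≠ pvNone))).length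
            = (xs.length - (xs.filter (fun c => decide (c ≠ pvNone))).length) + 1 from by
          simp only [List.length_cons]; omega]
      rw [List.replicate_succ]
      simpa using hxs
    · have hall := all_ne_of_settled x xs hs hx
      have hf : (x :: xs).filter (fun c => decide (c ≠ pvNone)) = x :: xs :=
        List.filter_eq_self.mpr (fun y hy => by simp [hall y hy])
      simp only [compact]
      rw [hf]
      simp

theorem fall_down_spec : Claim_equal_fall_down := by
  intro board _ hpre
  unfold Spec_fall_down
  obtain ⟨hne, hcols⟩ := hpre
  match board with
  | [] => exact absurd rfl hne
  | c0 :: bs =>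
    simp only [fall_down, List.head?_cons, fall_down_alt]
    apply List.map_congr_left
    intro col hcol
    rcases hcols col hcol with hlen | hset
    · exact fallColA_eq_compact c0.length col (by simpa using hlen)
    · show fallColA ((c0.length : Int) - 1) col = compact col
      rw [compact_settled col hset]
      unfold fallColA
      exact foldl_stepA_settled _ col hset _
        (fun x hx => by
          have := (PySem.List.mem_pyRange_neg_one).mp hx
          omega)
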